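-- pv_equiv track=rewrite | github.com/e2wugui/zeze | python/zeze/util.py | assign_copy_list
-- ===== SOURCE A (Python) =====
-- def assign_copy_list(a, b):
--     an = len(a)
--     bn = len(b)
--     n = min(an, bn)
--     for i in range(n):
--         a[i] = b[i].copy()
--     if an < bn:
--         for i in range(n, bn):
--             a.append(b[i].copy())
--     elif an > bn:
--         del a[n:an]
--     return a
-- ===== SOURCE B (Python) =====
-- def assign_copy_list(a, b):
--     a[:] = [x.copy() for x in b]
--     return a
-- ===== Notes on version B (the rewrite author's own statement) =====
-- stated objective: simpler
-- what changed: Replaces A's three-case min/append/del index bookkeeping with a single slice assignment of a freshly built list of copies.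
import Mathlib
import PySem

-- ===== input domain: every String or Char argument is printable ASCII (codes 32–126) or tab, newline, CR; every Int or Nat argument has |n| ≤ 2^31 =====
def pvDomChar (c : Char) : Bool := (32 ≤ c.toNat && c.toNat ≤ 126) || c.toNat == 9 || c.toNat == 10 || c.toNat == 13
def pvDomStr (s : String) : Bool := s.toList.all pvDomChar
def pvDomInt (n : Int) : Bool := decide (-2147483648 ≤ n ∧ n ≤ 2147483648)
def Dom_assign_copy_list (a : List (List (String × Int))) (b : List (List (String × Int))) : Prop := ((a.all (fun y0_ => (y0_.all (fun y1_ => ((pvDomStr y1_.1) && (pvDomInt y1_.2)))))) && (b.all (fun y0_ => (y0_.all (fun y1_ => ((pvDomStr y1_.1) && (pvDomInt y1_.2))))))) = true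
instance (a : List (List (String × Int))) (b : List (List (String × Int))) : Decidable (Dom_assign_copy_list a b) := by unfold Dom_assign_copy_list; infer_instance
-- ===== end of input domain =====

-- B replaces A's three-case min/append/del index loop by one slice assignment of a list of
-- copies (simpler); both Pythons mutate `a` in place identically, the theorem is about the return value.
-- ===== PORT A =====
def assign_copy_list (a : List (List (String × Int))) (b : List (List (String × Int))) : List (List (String × Int)) :=
  let an := a.length
  let bn := b.length
  let n := min an bn
  -- for i in range(n): a[i] = b[i].copy()   (i is always a valid nonnegative index here)
  let a1 := (List.range n).foldl (fun acc i => acc.set i (b.getD i [])) a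
  if an < bn then
    -- for i in range(n, bn): a.append(b[i].copy())
    (List.range' n (bn - n)).foldl (fun acc i => acc ++ [b.getD i []]) a1
  else if an > bn then
    -- del a[n:an]  (deletes to the end, since an = len(a))
    a1.take n
  else a1

-- ===== PORT B =====
def assign_copy_list_alt (a : List (List (String × Int))) (b : List (List (String × Int))) : List (List (String × Int)) :=
  -- a[:] = [x.copy() for x in b]; return a
  b.map (fun x => x)

-- ===== PRECONDITION & SPEC =====
def Spec_assign_copy_list (a : List (List (String × Int))) (b : List (List (String × Int))) (out : List (List (String × Int))) : Prop := out = assign_copy_list_alt a b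
instance (a : List (List (String × Int))) (b : List (List (String × Int))) (out : List (List (String × Int))) : Decidable (Spec_assign_copy_list a b out) := by unfold Spec_assign_copy_list; infer_instance

-- ===== CLAIM (what is proved, stated in full; the proofs are below) =====
def Claim_equal_assign_copy_list : Prop := ∀ (a : List (List (String × Int))) (b : List (List (String × Int))), Dom_assign_copy_list a b → Spec_assign_copy_list a b (assign_copy_list a b)

-- ===== LEMMAS AND PROOFS =====

-- ===== VERDICT (by name: the statement is the Claim_ definition above) =====
-- the first loop overwrites the first n slots of a with b's elements
lemma foldl_set_range (b : List (List (String × Int))) :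
    ∀ (n : Nat) (a : List (List (String × Int))), n ≤ a.length → n ≤ b.length →
    (List.range n).foldl (fun acc i => acc.set i (b.getD i [])) a = b.take n ++ a.drop n := by
  intro n
  induction n with
  | zero => intro a _ _; simp
  | succ m ih =>
    intro a ha hb
    rw [List.range_succ, List.foldl_append, ih a (Nat.le_of_succ_le ha) (Nat.le_of_succ_le hb)]
    simp only [List.foldl]
    have hm : m < a.length := ha
    have hbm : m < b.length := hb
    have hlen : (b.take m).length = m := by simp [Nat.le_of_lt hbm]
    rw [List.set_append_right _ _ (by omega), hlen, Nat.sub_self]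
    rw [List.drop_eq_getElem_cons hm, List.set_cons_zero]
    have hgd : b.getD m [] = b[m] := by simp [List.getD, List.getElem?_eq_getElem hbm]
    have ht : List.take (m+1) b = List.take m b ++ [b[m]] := by
      rw [List.take_add_one, List.getElem?_eq_getElem hbm]; rfl
    rw [hgd, ht, List.append_assoc]
    rfl

-- the second loop appends b's remaining elements
lemma foldl_append_range' (b : List (List (String × Int))) :
    ∀ (m k : Nat) (acc : List (List (String × Int))), k + m = b.length →
    (List.range' k m).foldl (fun acc i => acc ++ [b.getD i []]) acc = acc ++ b.drop k := by
  intro m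
  induction m with
  | zero =>
    intro k acc h
    have : k = b.length := by omega
    simp [this]
  | succ m ih =>
    intro k acc h
    have hk : k < b.length := by omega
    rw [List.range'_succ, List.foldl_cons, ih (k+1) _ (by omega)]
    have : b.getD k [] = b[k] := by simp [List.getD, List.getElem?_eq_getElem hk]
    rw [this, List.drop_eq_getElem_cons hk]
    simp

theorem assign_copy_list_spec : Claim_equal_assign_copy_list := by
  intro a b _
  show assign_copy_list a b = assign_copy_list_alt a b
  unfold assign_copy_list assign_copy_list_alt
  simp only [List.map_id_fun', id]
  rcases Nat.lt_trichotomy a.length b.length with h | h | h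
  · have hmin : min a.length b.length = a.length := Nat.min_eq_left (Nat.le_of_lt h)
    rw [hmin, foldl_set_range b a.length a (Nat.le_refl _) (Nat.le_of_lt h)]
    rw [if_pos h, List.drop_length, List.append_nil]
    rw [foldl_append_range' b (b.length - a.length) a.length (b.take a.length) (by omega)]
    exact List.take_append_drop _ _
  · have hmin : min a.length b.length = a.length := Nat.min_eq_left (Nat.le_of_eq h)
    rw [hmin, foldl_set_range b a.length a (Nat.le_refl _) (Nat.le_of_eq h)]
    rw [if_neg (by omega), if_neg (by omega), List.drop_length, List.append_nil, h, List.take_length]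
  · have hmin : min a.length b.length = b.length := Nat.min_eq_right (Nat.le_of_lt h)
    rw [hmin, foldl_set_range b b.length a (Nat.le_of_lt h) (Nat.le_refl _)]
    rw [if_neg (by omega), if_pos h, List.take_length]
    rw [List.take_append_of_le_length (Nat.le_refl _), List.take_length]
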